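-- pv_equiv track=rewrite | github.com/inferno0303/JWTRevoker_Controller | OptimizationEngine/test.py | upscale_m
-- ===== SOURCE A (Python) =====
-- def upscale_m(m):
--     if m <= 0 or m > 8589934592:
--         raise ValueError("m must be > 0 and <= 8589934592")
--     m_list = [1, 2, 4, 8, 16, 32, 64, 128, 256, 512, 1024, 2048, 4096, 8192, 16384, 32768, 65536, 131072, 262144,
--               524288, 1048576, 2097152, 4194304, 8388608, 16777216, 33554432, 67108864, 134217728, 268435456, 536870912,
--               1073741824, 2147483648, 4294967296, 8589934592]
--     for i in m_list:
--         if i > m: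
--             return i
-- ===== SOURCE B (Python) =====
-- def upscale_m(m):
--     if m <= 0 or m > 8589934592:
--         raise ValueError("m must be > 0 and <= 8589934592")
--     return 1 << m.bit_length()
-- ===== Notes on version B (the rewrite author's own statement) =====
-- stated objective: simpler
-- what changed: Replaces the linear scan over the hard-coded power-of-two table with the closed form one-shifted-left-by-bit_length(m), the first power of two strictly greater than m; the table and the loop disappear (both are constant-time, so no speed is claimed).
import Mathlib
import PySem

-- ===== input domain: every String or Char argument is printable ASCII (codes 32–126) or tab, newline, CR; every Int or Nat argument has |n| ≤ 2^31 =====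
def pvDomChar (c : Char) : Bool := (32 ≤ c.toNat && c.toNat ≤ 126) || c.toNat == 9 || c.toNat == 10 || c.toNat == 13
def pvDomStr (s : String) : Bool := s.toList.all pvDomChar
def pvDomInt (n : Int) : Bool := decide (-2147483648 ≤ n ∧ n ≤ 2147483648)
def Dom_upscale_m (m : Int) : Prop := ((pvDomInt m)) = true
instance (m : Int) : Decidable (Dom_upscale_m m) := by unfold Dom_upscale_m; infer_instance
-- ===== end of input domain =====

-- B replaces A's linear scan over the hard-coded power-of-two table with the closed form one-shifted-left-by-bit_length(m) (objective: simpler; no speed claimed).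

-- ===== PORT A =====
-- first element of the list strictly greater than m; 0 stands for Python's implicit None (excluded by Pre_)
def pvFindGT (m : Int) : List Int → Int
  | [] => 0
  | i :: rest => if i > m then i else pvFindGT m rest

def pvMList : List Int := [1, 2, 4, 8, 16, 32, 64, 128, 256, 512, 1024, 2048, 4096, 8192, 16384, 32768, 65536, 131072, 262144, 524288, 1048576, 2097152, 4194304, 8388608, 16777216, 33554432, 67108864, 134217728, 268435456, 536870912, 1073741824, 2147483648, 4294967296, 8589934592]

def upscale_m (m : Int) : Int :=
  if m ≤ 0 ∨ m > 8589934592 then 0   -- ValueError, excluded by Pre_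
  else pvFindGT m pvMList

-- ===== PORT B =====
-- Python's m.bit_length() for m ≥ 0
def pvBitLength (n : Nat) : Nat :=
  if n = 0 then 0 else pvBitLength (n / 2) + 1
termination_by n
decreasing_by omega

def upscale_m_alt (m : Int) : Int :=
  if m ≤ 0 ∨ m > 8589934592 then 0   -- ValueError, excluded by Pre_
  else (2 : Int) ^ pvBitLength m.toNat

-- ===== PRECONDITION & SPEC =====
-- Pre_ excludes m ≤ 0 and m > 8589934592, where A raises ValueError, and the single point
-- m = 8589934592, where A falls off the loop and returns None, which is not an int.
def Pre_upscale_m (m : Int) : Prop := 0 < m ∧ m < 8589934592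
instance (m : Int) : Decidable (Pre_upscale_m m) := by unfold Pre_upscale_m; infer_instance
def pvWitness_upscale_m : Int := 5
def Spec_upscale_m (m : Int) (out : Int) : Prop := out = upscale_m_alt m
instance (m : Int) (out : Int) : Decidable (Spec_upscale_m m out) := by unfold Spec_upscale_m; infer_instance

-- ===== CLAIM (what is proved, stated in full; the proofs are below) =====
def Claim_equal_upscale_m : Prop := ∀ (m : Int), Dom_upscale_m m → Pre_upscale_m m → Spec_upscale_m m (upscale_m m)

-- ===== LEMMAS AND PROOFS =====

-- bit_length bounds: for n > 0, 2^(bl n - 1) ≤ n < 2^(bl n)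
theorem pvBitLength_bounds (n : Nat) (h : 0 < n) :
    2 ^ (pvBitLength n - 1) ≤ n ∧ n < 2 ^ (pvBitLength n) := by
  induction n using Nat.strong_induction_on with
  | _ n ih =>
    rw [pvBitLength, if_neg (Nat.pos_iff_ne_zero.mp h)]
    by_cases hq : n / 2 = 0
    · have hn1 : n = 1 := by omega
      subst hn1
      simp [pvBitLength]
    · obtain ⟨ih1, ih2⟩ := ih (n / 2) (by omega) (by omega)
      have hb : 1 ≤ pvBitLength (n / 2) := by
        rw [pvBitLength]; simp [hq]
      have h2 : 2 ^ pvBitLength (n / 2) = 2 * 2 ^ (pvBitLength (n / 2) - 1) := by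
        conv_lhs => rw [show pvBitLength (n / 2) = (pvBitLength (n / 2) - 1) + 1 by omega]
        ring
      have h3 : 2 ^ (pvBitLength (n / 2) + 1) = 2 * 2 ^ pvBitLength (n / 2) := by ring
      simp only [Nat.add_sub_cancel]
      omega

-- pvFindGT over a contiguous block of powers of two returns 2^k, the first power exceeding m
theorem findGT_pow (b : Nat) : ∀ (a : Nat) (m : Int) (k : Nat),
    ((2:Int) ^ k > m) → (∀ j, j < k → (2:Int) ^ j ≤ m) → a ≤ k → k < a + b →
    pvFindGT m ((List.range' a b).map (fun i => (2:Int) ^ i)) = 2 ^ k := by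
  induction b with
  | zero => intro a m k _ _ _ hb; omega
  | succ b ih =>
    intro a m k h1 h2 ha hb
    simp only [List.range'_succ, List.map_cons, pvFindGT]
    by_cases hak : a = k
    · subst hak
      rw [if_pos h1]
    · rw [if_neg (by simpa using h2 a (by omega))]
      exact ih (a + 1) m k h1 h2 (by omega) (by omega)

theorem upscale_m_spec : Claim_equal_upscale_m := by
  intro m hDom hPre
  obtain ⟨hm0, _⟩ := hPre
  have hDom' : m ≤ 2147483648 := by
    unfold Dom_upscale_m pvDomInt at hDom
    have := of_decide_eq_true hDom
    exact this.2
  unfold Spec_upscale_m upscale_m upscale_m_alt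
  rw [if_neg (by omega), if_neg (by omega)]
  have hmn : (m.toNat : Int) = m := Int.toNat_of_nonneg (by omega)
  obtain ⟨hlo, hhi⟩ := pvBitLength_bounds m.toNat (by omega)
  have hk1 : 1 ≤ pvBitLength m.toNat := by
    rw [pvBitLength]; simp [show m.toNat ≠ 0 by omega]
  have hk32 : pvBitLength m.toNat ≤ 32 := by
    by_contra hgt
    have : 2 ^ 32 ≤ 2 ^ (pvBitLength m.toNat - 1) :=
      Nat.pow_le_pow_right (by norm_num) (by omega)
    omega
  set k := pvBitLength m.toNat with hk
  clear_value k
  have hML : pvMList = (List.range' 0 34).map (fun i => (2:Int) ^ i) := by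
    simp only [pvMList]; rfl
  rw [hML]
  refine findGT_pow 34 0 m k ?_ ?_ (Nat.zero_le _) (by omega)
  · have : m < ((2 ^ k : Nat) : Int) := by omega
    simpa using this
  · intro j hj
    have hjle : 2 ^ j ≤ 2 ^ (k - 1) := Nat.pow_le_pow_right (by norm_num) (by omega)
    have : ((2 ^ j : Nat) : Int) ≤ m := by omega
    simpa using this
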